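-- pv_equiv track=rewrite | github.com/rabin0208/hockey_modelling_score | src/process_nst_data.py | match_team_names
-- ===== SOURCE A (Python) =====
-- def match_team_names(nst_team_name, our_team_names):
--     """
--     Match NST team name to our team names.
--
--     Returns:
--         Matched team name or None
--     """
--     nst_lower = nst_team_name.lower()
--
--     # Try exact match first
--     for our_name in our_team_names:
--         if our_name.lower() == nst_lower:
--             return our_name
--
--     # Try partial match
--     for our_name in our_team_names:
--         if nst_lower in our_name.lower() or our_name.lower() in nst_lower:
--             return our_name
--
--     return None
-- ===== SOURCE B (Python) =====
-- def match_team_names(nst_team_name, our_team_names):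
--     """Single pass: return immediately on exact match; remember the first
--     partial-match candidate and return it (or None) after the loop."""
--     nst_lower = nst_team_name.lower()
--     first_partial = None
--     for name in our_team_names:
--         n = name.lower()
--         if n == nst_lower:
--             return name
--         if first_partial is None and (nst_lower in n or n in nst_lower):
--             first_partial = name
--     return first_partial
-- ===== Notes on version B (the rewrite author's own statement) =====
-- stated objective: alternative
-- what changed: Collapses A's two scans (exact pass then partial pass) into one pass that returns immediately on an exact match and remembers the first partial candidate; same cost in practice.
import Mathlib
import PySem

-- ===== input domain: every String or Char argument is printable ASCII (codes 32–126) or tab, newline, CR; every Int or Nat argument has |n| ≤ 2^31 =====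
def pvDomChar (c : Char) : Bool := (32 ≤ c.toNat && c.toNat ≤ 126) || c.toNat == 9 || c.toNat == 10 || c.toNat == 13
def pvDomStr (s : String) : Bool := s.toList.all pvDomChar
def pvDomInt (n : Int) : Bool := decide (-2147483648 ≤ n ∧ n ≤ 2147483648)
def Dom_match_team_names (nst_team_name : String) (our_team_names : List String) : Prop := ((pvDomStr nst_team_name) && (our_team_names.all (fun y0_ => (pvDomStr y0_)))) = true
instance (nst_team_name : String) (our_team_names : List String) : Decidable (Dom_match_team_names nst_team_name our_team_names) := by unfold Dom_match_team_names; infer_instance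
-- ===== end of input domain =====

-- B replaces A's two scans with one pass that remembers the first partial-match candidate (objective: alternative single-pass decomposition, same cost).

-- ===== PORT A =====
-- first loop of A: exact match
def pvExactScan (nst_lower : String) : List String → Option String
  | [] => none
  | n :: rest =>
    if PySem.Str.lower n == nst_lower then some n else pvExactScan nst_lower rest

-- second loop of A: partial match
def pvPartialScan (nst_lower : String) : List String → Option String
  | [] => none
  | n :: rest =>
    if PySem.Str.isIn nst_lower (PySem.Str.lower n) || PySem.Str.isIn (PySem.Str.lower n) nst_lower
    then some n else pvPartialScan nst_lower rest

def match_team_names (nst_team_name : String) (our_team_names : List String) : Option String :=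
  let nst_lower := PySem.Str.lower nst_team_name
  match pvExactScan nst_lower our_team_names with
  | some n => some n
  | none => pvPartialScan nst_lower our_team_names

-- ===== PORT B =====
-- B's single loop: state is the first partial candidate seen so far
def pvOneScan (nst_lower : String) (first_partial : Option String) : List String → Option String
  | [] => first_partial
  | name :: rest =>
    let n := PySem.Str.lower name
    if n == nst_lower then some name
    else pvOneScan nst_lower
      (if first_partial.isNone && (PySem.Str.isIn nst_lower n || PySem.Str.isIn n nst_lower)
       then some name else first_partial) rest

def match_team_names_alt (nst_team_name : String) (our_team_names : List String) : Option String :=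
  pvOneScan (PySem.Str.lower nst_team_name) none our_team_names

-- ===== PRECONDITION & SPEC =====
def Spec_match_team_names (nst_team_name : String) (our_team_names : List String) (out : Option String) : Prop := out = match_team_names_alt nst_team_name our_team_names
instance (nst_team_name : String) (our_team_names : List String) (out : Option String) : Decidable (Spec_match_team_names nst_team_name our_team_names out) := by unfold Spec_match_team_names; infer_instance

-- ===== CLAIM (what is proved, stated in full; the proofs are below) =====
def Claim_equal_match_team_names : Prop := ∀ (nst_team_name : String) (our_team_names : List String), Dom_match_team_names nst_team_name our_team_names → Spec_match_team_names nst_team_name our_team_names (match_team_names nst_team_name our_team_names)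

-- ===== LEMMAS AND PROOFS =====
theorem pvOneScan_eq (nl : String) (xs : List String) : ∀ (fp : Option String),
    pvOneScan nl fp xs =
      match pvExactScan nl xs with
      | some n => some n
      | none => match fp with
                | some f => some f
                | none => pvPartialScan nl xs := by
  induction xs with
  | nil => intro fp; cases fp <;> simp [pvOneScan, pvExactScan, pvPartialScan]
  | cons name rest ih =>
    intro fp
    by_cases hx : PySem.Str.lower name == nl
    · simp [pvOneScan, pvExactScan, hx]
    · cases fp with
      | some f => simp [pvOneScan, pvExactScan, hx, ih]
      | none =>
        simp [pvOneScan, pvExactScan, pvPartialScan, hx, ih]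
        cases pvExactScan nl rest <;> split_ifs <;> rfl

-- ===== VERDICT (by name: the statement is the Claim_ definition above) =====
theorem match_team_names_spec : Claim_equal_match_team_names := by
  intro nst our _
  unfold Spec_match_team_names match_team_names match_team_names_alt
  rw [pvOneScan_eq]
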